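-- pv_equiv track=rewrite | github.com/DGT-Network/PAMOLA | pamola_core/common/helpers/data_helper.py | generalize_range
-- ===== SOURCE A (Python) =====
-- def generalize_range(value: str) -> str:
--     """Generalizes a numerical range (e.g., '31-32' → '30-34')."""
--     predefined_ranges = {
--         (30, 34): "30-34",
--         (35, 39): "35-39",
--         (40, 49): "40-49",
--     }
--
--     try:
--         lower, upper = map(int, value.split("-"))
--         for (low, high), label in predefined_ranges.items():
--             if low <= lower <= high and low <= upper <= high:
--                 return label
--         return f"{lower}-{upper}"  # Keep original if no match
--     except ValueError:
--         return value  # Return as-is if not a valid range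
-- ===== SOURCE B (Python) =====
-- _TABLE = {
--     i: label
--     for (lo, hi), label in {(30, 34): "30-34", (35, 39): "35-39", (40, 49): "40-49"}.items()
--     for i in range(lo, hi + 1)
-- }
--
--
-- def _parse_pair(value):
--     """lower, upper = map(int, value.split('-')), or None on ValueError."""
--     parts = value.split("-")
--     if len(parts) != 2:
--         return None
--     try:
--         return int(parts[0]), int(parts[1])
--     except ValueError:
--         return None
--
--
-- def generalize_range(value: str) -> str:
--     """Generalizes a numerical range via a precomputed int -> label table."""
--     pair = _parse_pair(value)
--     if pair is None:
--         return value  # Return as-is if not a valid range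
--     lower, upper = pair
--     label = _TABLE.get(lower)
--     if label is not None and _TABLE.get(upper) == label:
--         return label
--     return f"{lower}-{upper}"  # Keep original if no match
-- ===== Notes on version B (the rewrite author's own statement) =====
-- stated objective: idiomatic
-- what changed: Replaces the per-call scan over (low,high) range tuples with a precomputed int-to-label lookup table built once at module load; both endpoints are looked up directly and must map to the same label.
import Mathlib
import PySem

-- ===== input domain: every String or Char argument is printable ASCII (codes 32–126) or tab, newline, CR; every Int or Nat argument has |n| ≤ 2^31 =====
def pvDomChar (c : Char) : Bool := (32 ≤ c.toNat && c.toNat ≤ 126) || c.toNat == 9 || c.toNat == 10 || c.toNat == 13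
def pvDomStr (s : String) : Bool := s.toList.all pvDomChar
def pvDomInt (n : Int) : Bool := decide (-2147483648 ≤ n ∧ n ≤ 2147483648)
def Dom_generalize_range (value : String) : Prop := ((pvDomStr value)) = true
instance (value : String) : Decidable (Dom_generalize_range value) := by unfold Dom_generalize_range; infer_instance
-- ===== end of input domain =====

-- B replaces A's per-call scan over range tuples by a precomputed int→label table with two direct lookups (idiomatic).

-- ===== PORT A =====
-- the for-loop over predefined_ranges.items()
def pvScanRanges (ranges : List ((Int × Int) × String)) (lower upper : Int) : String :=
  match ranges with
  | [] => PySem.Int.toStr lower ++ "-" ++ PySem.Int.toStr upper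
  | ((low, high), label) :: rest =>
      if low ≤ lower ∧ lower ≤ high ∧ low ≤ upper ∧ upper ≤ high then label
      else pvScanRanges rest lower upper

def generalize_range (value : String) : String :=
  match PySem.Str.split? value "-" with
  | some [a, b] =>
      match PySem.Int.ofStr? a, PySem.Int.ofStr? b with
      | some lower, some upper =>
          pvScanRanges [((30, 34), "30-34"), ((35, 39), "35-39"), ((40, 49), "40-49")] lower upper
      | _, _ => value
  | _ => value

-- ===== PORT B =====
-- _TABLE: every covered integer mapped to its label, built once
def pvTable : PySem.Dict Int String :=
  [((30, 34), "30-34"), ((35, 39), "35-39"), ((40, 49), "40-49")].foldl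
    (fun d p => (PySem.List.pyRange p.1.1 (p.1.2 + 1) 1).foldl (fun d i => d.insert i p.2) d)
    PySem.Dict.empty

-- lower, upper = map(int, value.split("-")), or none on ValueError
def pvParsePair (value : String) : Option (Int × Int) :=
  (PySem.Str.split? value "-").bind fun parts =>
    if parts.length = 2 then
      (PySem.Int.ofStr? (parts.getD 0 "")).bind fun lo =>
        (PySem.Int.ofStr? (parts.getD 1 "")).map fun hi => (lo, hi)
    else none

def generalize_range_alt (value : String) : String :=
  match pvParsePair value with
  | none => value
  | some (lower, upper) =>
      match pvTable.get? lower with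
      | some label =>
          if pvTable.get? upper == some label then label
          else PySem.Int.toStr lower ++ "-" ++ PySem.Int.toStr upper
      | none => PySem.Int.toStr lower ++ "-" ++ PySem.Int.toStr upper

-- ===== PRECONDITION & SPEC =====
def Spec_generalize_range (value : String) (out : String) : Prop := out = generalize_range_alt value
instance (value : String) (out : String) : Decidable (Spec_generalize_range value out) := by unfold Spec_generalize_range; infer_instance

-- ===== CLAIM (what is proved, stated in full; the proofs are below) =====
def Claim_equal_generalize_range : Prop := ∀ (value : String), Dom_generalize_range value → Spec_generalize_range value (generalize_range value)

-- ===== LEMMAS AND PROOFS =====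
set_option maxHeartbeats 2000000 in
theorem pvTable_get? (n : Int) :
    pvTable.get? n =
      if 30 ≤ n ∧ n ≤ 34 then some "30-34"
      else if 35 ≤ n ∧ n ≤ 39 then some "35-39"
      else if 40 ≤ n ∧ n ≤ 49 then some "40-49"
      else none := by
  have h : pvTable = PySem.Dict.mk
      [(30, "30-34"), (31, "30-34"), (32, "30-34"), (33, "30-34"), (34, "30-34"),
       (35, "35-39"), (36, "35-39"), (37, "35-39"), (38, "35-39"), (39, "35-39"),
       (40, "40-49"), (41, "40-49"), (42, "40-49"), (43, "40-49"), (44, "40-49"),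
       (45, "40-49"), (46, "40-49"), (47, "40-49"), (48, "40-49"), (49, "40-49")] := by
    decide
  rw [h]
  simp only [PySem.Dict.get?_mk_cons, beq_iff_eq]
  by_cases hin : 30 ≤ n ∧ n ≤ 49
  · obtain ⟨h1, h2⟩ := hin
    interval_cases n <;> norm_num
  · rw [if_neg (by omega), if_neg (by omega), if_neg (by omega), if_neg (by omega),
        if_neg (by omega), if_neg (by omega), if_neg (by omega), if_neg (by omega),
        if_neg (by omega), if_neg (by omega), if_neg (by omega), if_neg (by omega),
        if_neg (by omega), if_neg (by omega), if_neg (by omega), if_neg (by omega),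
        if_neg (by omega), if_neg (by omega), if_neg (by omega), if_neg (by omega),
        if_neg (by omega), if_neg (by omega), if_neg (by omega)]
    rfl

theorem pvScan_eq (lower upper : Int) :
    pvScanRanges [((30, 34), "30-34"), ((35, 39), "35-39"), ((40, 49), "40-49")] lower upper =
      (match pvTable.get? lower with
       | some label =>
           if pvTable.get? upper == some label then label
           else PySem.Int.toStr lower ++ "-" ++ PySem.Int.toStr upper
       | none => PySem.Int.toStr lower ++ "-" ++ PySem.Int.toStr upper) := by
  simp only [pvScanRanges, pvTable_get?]
  split_ifs <;> simp_all <;> omega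

-- ===== VERDICT (by name: the statement is the Claim_ definition above) =====
theorem generalize_range_spec : Claim_equal_generalize_range := by
  intro value _
  unfold Spec_generalize_range
  simp only [generalize_range, generalize_range_alt, pvParsePair]
  cases h : PySem.Str.split? value "-" with
  | none => rfl
  | some parts =>
    rcases parts with _ | ⟨a, _ | ⟨b, _ | ⟨c, t⟩⟩⟩ <;> try rfl
    cases ha : PySem.Int.ofStr? a <;> cases hb : PySem.Int.ofStr? b <;>
      simp [ha, hb, pvScan_eq]
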